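-- pv_equiv track=rewrite | github.com/meli088/HMM-ChIPseq-Differential-Histone | chipdiff/src/03_find_putative_sites.py | merge_within_1kb
-- ===== SOURCE A (Python) =====
-- def merge_within_1kb(bins, gap_bp=1000):
--     """
--     Merge consecutive genomic bins that are within a specified gap.
--
--     Parameters
--     ----------
--     bins : list of tuple
--         Iterable of genomic bins, each represented as (chrom, start, end). Chromosome should be
--         comparable (e.g. string), and start/end should be integers. The input may be unsorted.
--     gap_bp : int, optional
--         Maximum allowed gap in base pairs between adjacent bins on the same chromosome for them to be
--         merged. Default is 1000.
--
--     Returns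
--     -------
--     list of tuple
--         A list of merged regions as (chrom, start, end), sorted by chromosome and start. Consecutive
--         bins on the same chromosome whose gap (start of the next bin minus current end) is less than
--         or equal to gap_bp will be merged into a single region.
--
--     Behavior and assumptions
--     ------------------------
--     - The function sorts the input by (chrom, start, end) before merging; the original order is not preserved.
--     - Overlapping bins (where start <= current_end) are considered to have zero gap and will be merged.
--     - Each returned region has the minimal start and maximal end covering the merged bins.
--     - Assumes each bin has end >= start and that coordinates are integers.
--     - If `bins` is empty, an empty list is returned.
--
--     Examples
--     --------
--     >>> bins = [('chr1', 100, 200), ('chr1', 250, 300), ('chr1', 1300, 1400)]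
--     >>> merge_within_1kb(bins, gap_bp=1000)
--     [('chr1', 100, 300), ('chr1', 1300, 1400)]
--     """
--     if not bins:
--         return []
--
--     # sort by chrom, then start
--     bins.sort(key=lambda t: (t[0], t[1], t[2]))
--
--     merged = []
--     cur_chrom, cur_start, cur_end = bins[0]
--
--     for chrom, start, end in bins[1:]:
--         if chrom == cur_chrom and start <= cur_end + gap_bp:
--             # extend region
--             if end > cur_end:
--                 cur_end = end
--         else:
--             merged.append((cur_chrom, cur_start, cur_end))
--             cur_chrom, cur_start, cur_end = chrom, start, end
--
--     merged.append((cur_chrom, cur_start, cur_end))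
--     return merged
-- ===== SOURCE B (Python) =====
-- def merge_within_1kb(bins, gap_bp=1000):
--     """Two-pass re-implementation: sort in place (as A does), group bins into
--     per-chromosome interval lists in one pass, then merge each group
--     independently with the gap test start <= cur_end + gap_bp."""
--     bins.sort(key=lambda t: (t[0], t[1], t[2]))
--
--     groups = []
--     for chrom, start, end in bins:
--         if groups and groups[-1][0] == chrom:
--             groups[-1][1].append((start, end))
--         else:
--             groups.append((chrom, [(start, end)]))
--
--     out = []
--     for chrom, ivs in groups:
--         cur_s, cur_e = ivs[0]
--         for s, e in ivs[1:]:
--             if s <= cur_e + gap_bp: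
--                 cur_e = max(cur_e, e)
--             else:
--                 out.append((chrom, cur_s, cur_e))
--                 cur_s, cur_e = s, e
--         out.append((chrom, cur_s, cur_e))
--     return out
-- ===== Notes on version B (the rewrite author's own statement) =====
-- stated objective: alternative
-- what changed: B replaces A's single flat scan that carries cur_chrom across chromosome boundaries with a two-pass grouped traversal: one pass groups the sorted bins into per-chromosome interval lists, then each group is merged independently with the same gap test.
import Mathlib
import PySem

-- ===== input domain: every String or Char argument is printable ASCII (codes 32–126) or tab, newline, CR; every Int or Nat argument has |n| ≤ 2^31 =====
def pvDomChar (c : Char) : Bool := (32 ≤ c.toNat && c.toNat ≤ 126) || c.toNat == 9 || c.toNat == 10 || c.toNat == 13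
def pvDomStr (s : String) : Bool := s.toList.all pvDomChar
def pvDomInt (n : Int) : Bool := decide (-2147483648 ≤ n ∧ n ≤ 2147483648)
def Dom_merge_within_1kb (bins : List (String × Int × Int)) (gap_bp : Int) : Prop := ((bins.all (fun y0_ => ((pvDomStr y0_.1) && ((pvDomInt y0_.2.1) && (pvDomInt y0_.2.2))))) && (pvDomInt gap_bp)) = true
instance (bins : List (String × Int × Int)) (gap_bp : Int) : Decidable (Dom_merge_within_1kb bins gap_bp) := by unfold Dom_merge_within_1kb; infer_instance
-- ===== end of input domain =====

-- B regroups the sorted bins per chromosome and merges each group separately instead of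
-- A's single flat scan carrying cur_chrom (objective: alternative, not faster).
-- Both Pythons sort `bins` in place; the equivalence proved here is about the return value
-- (the in-place sort is identical in A and B, so the observable mutation agrees too).

-- Python's tuple key (t[0], t[1], t[2]) compared with '<' is lexicographic on the triple.
def pyLexLt (a b : String × Int × Int) : Bool :=
  decide (a.1 < b.1) ||
    (a.1 == b.1 && (decide (a.2.1 < b.2.1) || (a.2.1 == b.2.1 && decide (a.2.2 < b.2.2))))

-- bins.sort(key=lambda t: (t[0], t[1], t[2])): Python's stable sort; exact as the stable
-- insertion-sort PySem.List.sorted is defined by (see PySem.List.sorted_eq_foldl_insertBy),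
-- with the strict-less test pyLexLt = decide ((t[0],t[1],t[2]) < …) spelled out.
def pySortBins (bins : List (String × Int × Int)) : List (String × Int × Int) :=
  bins.foldl (fun acc x => PySem.List.insertBy pyLexLt x acc) []

-- ===== PORT A =====
-- the body of A's for-loop (state: merged list so far, cur_chrom, cur_start, cur_end)
def stepA (gap_bp : Int) (st : List (String × Int × Int) × String × Int × Int)
    (x : String × Int × Int) : List (String × Int × Int) × String × Int × Int :=
  if x.1 == st.2.1 && decide (x.2.1 ≤ st.2.2.2 + gap_bp) then
    (st.1, st.2.1, st.2.2.1, if decide (x.2.2 > st.2.2.2) then x.2.2 else st.2.2.2)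
  else
    (st.1 ++ [st.2], x.1, x.2.1, x.2.2)

def merge_within_1kb (bins : List (String × Int × Int)) (gap_bp : Int) : List (String × Int × Int) :=
  if bins = [] then []
  else
    match pySortBins bins with
    | [] => []  -- unreachable: the sort of a nonempty list is nonempty (Python reads bins[0] here)
    | x :: rest =>
      let st := rest.foldl (stepA gap_bp) ([], x.1, x.2.1, x.2.2)
      st.1 ++ [st.2]

-- ===== PORT B =====
-- pass 1 of Source B: append (start, end) to the last group if it has the same chrom, else open a new group
def groupStep (gs : List (String × List (Int × Int))) (x : String × Int × Int) :
    List (String × List (Int × Int)) :=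
  match gs.getLast? with
  | some g => if g.1 == x.1 then gs.dropLast ++ [(g.1, g.2 ++ [(x.2.1, x.2.2)])]
              else gs ++ [(x.1, [(x.2.1, x.2.2)])]
  | none => gs ++ [(x.1, [(x.2.1, x.2.2)])]

-- the body of Source B's inner merge loop over ivs[1:] (state: out list so far, cur_s, cur_e)
def stepB (gap_bp : Int) (c : String) (st : List (String × Int × Int) × Int × Int)
    (iv : Int × Int) : List (String × Int × Int) × Int × Int :=
  if decide (iv.1 ≤ st.2.2 + gap_bp) then (st.1, st.2.1, max st.2.2 iv.2)
  else (st.1 ++ [(c, st.2.1, st.2.2)], iv.1, iv.2)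

-- pass 2 of Source B, one group: merge its intervals onto the output accumulated so far
def mergeOut (gap_bp : Int) (acc : List (String × Int × Int)) (g : String × List (Int × Int)) :
    List (String × Int × Int) :=
  match g.2 with
  | [] => acc  -- unreachable: every group built by groupStep carries at least one interval
  | iv0 :: tl =>
    let st := tl.foldl (stepB gap_bp g.1) (acc, iv0.1, iv0.2)
    st.1 ++ [(g.1, st.2.1, st.2.2)]

def merge_within_1kb_alt (bins : List (String × Int × Int)) (gap_bp : Int) :
    List (String × Int × Int) :=
  ((pySortBins bins).foldl groupStep []).foldl (mergeOut gap_bp) []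

-- ===== PRECONDITION & SPEC =====
def Spec_merge_within_1kb (bins : List (String × Int × Int)) (gap_bp : Int) (out : List (String × Int × Int)) : Prop := out = merge_within_1kb_alt bins gap_bp
instance (bins : List (String × Int × Int)) (gap_bp : Int) (out : List (String × Int × Int)) : Decidable (Spec_merge_within_1kb bins gap_bp out) := by unfold Spec_merge_within_1kb; infer_instance

-- ===== CLAIM (what is proved, stated in full; the proofs are below) =====
def Claim_equal_merge_within_1kb : Prop := ∀ (bins : List (String × Int × Int)) (gap_bp : Int), Dom_merge_within_1kb bins gap_bp → Spec_merge_within_1kb bins gap_bp (merge_within_1kb bins gap_bp)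

-- ===== LEMMAS AND PROOFS =====

-- A's flat scan, written front-to-back (recursive characterisation of the foldl)
def scanRec (gap : Int) (c : String) (s e : Int) : List (String × Int × Int) → List (String × Int × Int)
  | [] => [(c, s, e)]
  | x :: t =>
    if x.1 == c && decide (x.2.1 ≤ e + gap) then
      scanRec gap c s (if decide (x.2.2 > e) then x.2.2 else e) t
    else (c, s, e) :: scanRec gap x.1 x.2.1 x.2.2 t

-- B's per-group merge, written front-to-back
def pairScan (gap s e : Int) : List (Int × Int) → List (Int × Int)
  | [] => [(s, e)]
  | iv :: t =>
    if decide (iv.1 ≤ e + gap) then pairScan gap s (max e iv.2) t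
    else (s, e) :: pairScan gap iv.1 iv.2 t

-- the chrom-contiguous blocks of a list (what pass 1 of Source B computes)
def blocks : List (String × Int × Int) → List (String × List (Int × Int))
  | [] => []
  | x :: t =>
    (x.1, (x.2.1, x.2.2) :: (t.takeWhile (fun y => x.1 == y.1)).map (fun y => (y.2.1, y.2.2)))
      :: blocks (t.dropWhile (fun y => x.1 == y.1))
termination_by l => l.length
decreasing_by
  simp only [List.length_cons]
  exact Nat.lt_succ_of_le (List.length_dropWhile_le _ _)

def mergeBlocks (gap : Int) : List (String × List (Int × Int)) → List (String × Int × Int)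
  | [] => []
  | g :: gs =>
    (match g.2 with
     | [] => []
     | iv0 :: tl => (pairScan gap iv0.1 iv0.2 tl).map (fun p => (g.1, p.1, p.2)))
      ++ mergeBlocks gap gs

lemma foldA (gap : Int) (t : List (String × Int × Int)) :
    ∀ (acc : List (String × Int × Int)) (c : String) (s e : Int),
      (t.foldl (stepA gap) (acc, c, s, e)).1 ++ [(t.foldl (stepA gap) (acc, c, s, e)).2]
        = acc ++ scanRec gap c s e t := by
  induction t with
  | nil => intro acc c s e; simp [scanRec]
  | cons x t ih =>
    intro acc c s e
    simp only [List.foldl_cons, scanRec, stepA]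
    by_cases h : (x.1 == c && decide (x.2.1 ≤ e + gap)) = true
    · simp [h, ih]
    · simp [h, ih]

lemma foldB (gap : Int) (c : String) (t : List (Int × Int)) :
    ∀ (acc : List (String × Int × Int)) (s e : Int),
      (t.foldl (stepB gap c) (acc, s, e)).1 ++ [(c, (t.foldl (stepB gap c) (acc, s, e)).2.1, (t.foldl (stepB gap c) (acc, s, e)).2.2)]
        = acc ++ (pairScan gap s e t).map (fun p => (c, p.1, p.2)) := by
  induction t with
  | nil => intro acc s e; simp [pairScan]
  | cons iv t ih =>
    intro acc s e
    simp only [List.foldl_cons, pairScan, stepB]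
    by_cases h : (iv.1 ≤ e + gap)
    · simp [h, ih]
    · simp [h, ih]

lemma foldOut (gap : Int) (gs : List (String × List (Int × Int))) :
    ∀ acc, gs.foldl (mergeOut gap) acc = acc ++ mergeBlocks gap gs := by
  induction gs with
  | nil => intro acc; simp [mergeBlocks]
  | cons g gs ih =>
    intro acc
    simp only [List.foldl_cons, mergeBlocks]
    cases hg : g.2 with
    | nil => simp [mergeOut, hg, ih]
    | cons iv0 tl =>
      have h := foldB gap g.1 tl acc iv0.1 iv0.2
      simp only [mergeOut, hg, ih]
      generalize tl.foldl (stepB gap g.1) (acc, iv0.1, iv0.2) = st at h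
      obtain ⟨o, cs, ce⟩ := st
      dsimp only at h ⊢
      rw [h, List.append_assoc]

lemma group_inert (l : List (String × Int × Int)) :
    ∀ (gs gs' : List (String × List (Int × Int))), gs' ≠ [] →
      l.foldl groupStep (gs ++ gs') = gs ++ l.foldl groupStep gs' := by
  induction l with
  | nil => intro gs gs' _; rfl
  | cons x l ih =>
    intro gs gs' h
    simp only [List.foldl_cons]
    have hlast : (gs ++ gs').getLast? = gs'.getLast? := List.getLast?_append_of_ne_nil _ h
    have hdrop : (gs ++ gs').dropLast = gs ++ gs'.dropLast := List.dropLast_append_of_ne_nil h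
    rcases hl : gs'.getLast? with _ | g
    · exact absurd (List.getLast?_eq_none_iff.mp hl) h
    · by_cases hc : (g.1 == x.1) = true
      · rw [show groupStep (gs ++ gs') x = gs ++ groupStep gs' x by
          simp [groupStep, hlast, hl, hc, hdrop]]
        exact ih _ _ (by simp [groupStep, hl, hc])
      · rw [show groupStep (gs ++ gs') x = gs ++ groupStep gs' x by
          simp [groupStep, hlast, hl, hc]]
        exact ih _ _ (by simp [groupStep, hl, hc])

lemma group_run (t : List (String × Int × Int)) :
    ∀ (c : String) (ivs : List (Int × Int)),
      t.foldl groupStep [(c, ivs)]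
        = (c, ivs ++ (t.takeWhile (fun y => c == y.1)).map (fun y => (y.2.1, y.2.2)))
            :: blocks (t.dropWhile (fun y => c == y.1)) := by
  induction t with
  | nil => intro c ivs; simp [blocks]
  | cons x t ih =>
    intro c ivs
    simp only [List.foldl_cons]
    by_cases hc : (c == x.1) = true
    · rw [show groupStep [(c, ivs)] x = [(c, ivs ++ [(x.2.1, x.2.2)])] by simp [groupStep, hc]]
      rw [ih]
      simp [hc]
    · rw [show groupStep [(c, ivs)] x = [(c, ivs)] ++ [(x.1, [(x.2.1, x.2.2)])] by
        simp [groupStep, hc]]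
      rw [group_inert t _ _ (by simp), ih]
      simp [hc, blocks]

lemma groups_eq_blocks (l : List (String × Int × Int)) :
    l.foldl groupStep [] = blocks l := by
  cases l with
  | nil => simp [blocks]
  | cons x t =>
    simp only [List.foldl_cons]
    rw [show groupStep [] x = [(x.1, [(x.2.1, x.2.2)])] by simp [groupStep]]
    rw [group_run]
    simp [blocks]

lemma max_if (a b : Int) : (if decide (b > a) then b else a) = max a b := by
  by_cases h : b > a
  · simp [h, max_eq_right (le_of_lt h)]
  · simp [h, max_eq_left (by omega : b ≤ a)]

lemma scan_blocks (gap : Int) (t : List (String × Int × Int)) :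
    ∀ (c : String) (s e : Int),
      scanRec gap c s e t = mergeBlocks gap (blocks ((c, s, e) :: t)) := by
  induction t with
  | nil => intro c s e; simp [scanRec, blocks, mergeBlocks, pairScan]
  | cons x t ih =>
    intro c s e
    by_cases hc : c = x.1
    · subst hc
      by_cases hg : (x.2.1 ≤ e + gap)
      · rw [scanRec, if_pos (by simp [hg])]
        rw [ih, max_if]
        simp [blocks, mergeBlocks, pairScan, hg]
      · rw [scanRec, if_neg (by simp [hg])]
        rw [ih]
        simp [blocks, mergeBlocks, pairScan, hg]
    · have h1 : (x.1 == c) = false := by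
        simp only [beq_eq_false_iff_ne]; exact fun h => hc h.symm
      have h2 : (c == x.1) = false := by simp only [beq_eq_false_iff_ne]; exact hc
      rw [scanRec, if_neg (by simp [h1])]
      rw [ih]
      simp [blocks, mergeBlocks, pairScan, h2]

-- ===== VERDICT (by name: the statement is the Claim_ definition above) =====
theorem merge_within_1kb_spec : Claim_equal_merge_within_1kb := by
  intro bins gap_bp _
  unfold Spec_merge_within_1kb merge_within_1kb merge_within_1kb_alt
  by_cases hb : bins = []
  · subst hb; rfl
  · simp only [hb, if_false]
    rw [groups_eq_blocks, foldOut]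
    cases hsb : pySortBins bins with
    | nil => simp [blocks, mergeBlocks]
    | cons x rest =>
      simp only [List.nil_append]
      rw [foldA, scan_blocks]
      simp [blocks, mergeBlocks]
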